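-- pv_equiv track=rewrite | github.com/vstrimaitis/aoc-2024 | leaderboard/calc_scores.py | to_leaderboard
-- ===== SOURCE A (Python) =====
-- def to_leaderboard(scores: dict[str, int]) -> list[tuple[int, int, str]]:
--     assigned_pos = 1
--     real_pos = 1
--     prev_score = 10**100
--     ans = []
--     for user, score in sorted(scores.items(), key=lambda x: x[1], reverse=True):
--         if score != prev_score:
--             assigned_pos = real_pos
--         ans.append((assigned_pos, score, user))
--         real_pos += 1
--         prev_score = score
--     return ans
-- ===== SOURCE B (Python) =====
-- def to_leaderboard(scores: dict[str, int]) -> list[tuple[int, int, str]]: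
--     items = sorted(scores.items(), key=lambda x: x[1], reverse=True)
--     return [(1 + sum(1 for _, w in items if w > v), v, u) for u, v in items]
-- ===== Notes on version B (the rewrite author's own statement) =====
-- stated objective: simpler
-- what changed: Replaced the stateful prev-score/assigned-pos/real-pos bookkeeping loop by a stateless closed form: each entry's rank is 1 + the number of entries with a strictly greater score, emitted in the same stable descending order.
import Mathlib
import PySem

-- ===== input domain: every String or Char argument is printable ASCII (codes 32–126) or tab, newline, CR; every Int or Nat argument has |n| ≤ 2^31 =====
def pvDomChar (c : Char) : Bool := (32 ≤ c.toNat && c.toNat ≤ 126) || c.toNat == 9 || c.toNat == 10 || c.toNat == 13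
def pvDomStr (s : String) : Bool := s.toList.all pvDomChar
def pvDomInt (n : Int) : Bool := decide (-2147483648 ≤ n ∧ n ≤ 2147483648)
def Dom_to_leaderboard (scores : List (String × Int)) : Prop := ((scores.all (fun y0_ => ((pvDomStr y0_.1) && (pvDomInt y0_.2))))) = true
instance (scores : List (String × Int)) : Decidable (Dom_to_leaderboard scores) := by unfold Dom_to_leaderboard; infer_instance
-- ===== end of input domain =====

-- B replaces A's prev-score/assigned-pos bookkeeping loop by the stateless closed form
-- "rank = 1 + number of strictly greater scores" over the same stable descending sort (objective: simpler).


-- ===== PORT A =====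
def to_leaderboard (scores : List (String × Int)) : List (Int × Int × String) :=
  let ys := PySem.List.sorted scores (fun x => x.2) true
  (ys.foldl
    (fun (st : Int × Int × Int × List (Int × Int × String)) uv =>
      let assigned_pos := if uv.2 ≠ st.2.2.1 then st.2.1 else st.1
      (assigned_pos, st.2.1 + 1, uv.2, st.2.2.2 ++ [(assigned_pos, uv.2, uv.1)]))
    (1, 1, 10 ^ 100, [])).2.2.2

-- ===== PORT B =====
def to_leaderboard_alt (scores : List (String × Int)) : List (Int × Int × String) :=
  let items := PySem.List.sorted scores (fun x => x.2) true
  items.map (fun uv => (1 + ((items.countP (fun w => decide (uv.2 < w.2))) : Int), uv.2, uv.1))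

-- ===== PRECONDITION & SPEC =====
def Spec_to_leaderboard (scores : List (String × Int)) (out : List (Int × Int × String)) : Prop := out = to_leaderboard_alt scores
instance (scores : List (String × Int)) (out : List (Int × Int × String)) : Decidable (Spec_to_leaderboard scores out) := by unfold Spec_to_leaderboard; infer_instance

-- ===== CLAIM (what is proved, stated in full; the proofs are below) =====
def Claim_equal_to_leaderboard : Prop := ∀ (scores : List (String × Int)), Dom_to_leaderboard scores → Spec_to_leaderboard scores (to_leaderboard scores)

-- ===== LEMMAS AND PROOFS =====

-- the number of entries of ys with score strictly greater than v, as an Int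
def countG (ys : List (String × Int)) (v : Int) : Int :=
  ((ys.countP (fun w => decide (v < w.2))) : Int)

-- A's loop step
def stepA (st : Int × Int × Int × List (Int × Int × String)) (uv : String × Int) :
    Int × Int × Int × List (Int × Int × String) :=
  let assigned_pos := if uv.2 ≠ st.2.2.1 then st.2.1 else st.1
  (assigned_pos, st.2.1 + 1, uv.2, st.2.2.2 ++ [(assigned_pos, uv.2, uv.1)])

-- Loop invariant: processing the suffix t of ys (ys = pre ++ t) with real_pos = |pre|+1,
-- prev_score p bounding t from above, and either the initial sentinel state or
-- assigned_pos = 1 + countG ys p with pre bounded below by p, yields the closed-form ranks.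
lemma loopA_eq (ys : List (String × Int))
    (hpw : ys.Pairwise (fun a b => b.2 ≤ a.2)) :
    ∀ (t pre : List (String × Int)) (ans : List (Int × Int × String)) (a p : Int),
      ys = pre ++ t →
      (∀ x ∈ t, x.2 ≤ p) →
      ((pre = [] ∧ ∀ x ∈ ys, x.2 < p) ∨ (a = 1 + countG ys p ∧ ∀ x ∈ pre, p ≤ x.2)) →
      (t.foldl stepA (a, (pre.length : Int) + 1, p, ans)).2.2.2
        = ans ++ t.map (fun uv => (1 + countG ys uv.2, uv.2, uv.1)) := by
  intro t
  induction t with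
  | nil => intro pre ans a p _ _ _; simp
  | cons hd tl ih =>
    intro pre ans a p hsplit hub hinv
    have hmemhd : hd ∈ ys := by rw [hsplit]; simp
    -- pairwise facts about the suffix
    have hpt : (hd :: tl).Pairwise (fun a b => b.2 ≤ a.2) := by
      rw [hsplit] at hpw; exact (List.pairwise_append.mp hpw).2.1
    have htl_le : ∀ x ∈ tl, x.2 ≤ hd.2 := fun x hx => (List.pairwise_cons.mp hpt).1 x hx
    have hhd_le_p : hd.2 ≤ p := hub hd (by simp)
    -- the assigned position for hd equals the closed-form rank
    have hcount : (if hd.2 ≠ p then (pre.length : Int) + 1 else a) = 1 + countG ys hd.2 := by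
      rcases hinv with ⟨hpre, hlt⟩ | ⟨ha, hpre_ge⟩
      · -- sentinel state: pre = [], every score < p, hd is the maximum
        have hne : hd.2 ≠ p := ne_of_lt (hlt hd hmemhd)
        have h0 : ys.countP (fun w => decide (hd.2 < w.2)) = 0 := by
          rw [List.countP_eq_zero]
          intro w hw
          rw [hsplit, hpre, List.nil_append, List.mem_cons] at hw
          simp only [decide_eq_true_eq]
          rcases hw with h | h
          · subst h; omega
          · have := htl_le w h; omega
        simp [hne, hpre, countG, h0]
      · by_cases he : hd.2 = p
        · simp [he, ha]
        · have hlt' : hd.2 < p := lt_of_le_of_ne hhd_le_p he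
          have hcnt : ys.countP (fun w => decide (hd.2 < w.2)) = pre.length := by
            rw [hsplit, List.countP_append]
            have h1 : pre.countP (fun w => decide (hd.2 < w.2)) = pre.length := by
              rw [List.countP_eq_length]
              intro w hw
              have := hpre_ge w hw
              simp only [decide_eq_true_eq]; omega
            have h2 : (hd :: tl).countP (fun w => decide (hd.2 < w.2)) = 0 := by
              rw [List.countP_eq_zero]
              intro w hw
              rw [List.mem_cons] at hw
              simp only [decide_eq_true_eq]
              rcases hw with h | h
              · subst h; omega
              · have := htl_le w h; omega
            rw [h1, h2]
            omega
          simp only [he, countG, hcnt]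
          split <;> omega
    -- step and apply the induction hypothesis with pre ++ [hd]
    have hstep :
        ((hd :: tl).foldl stepA (a, (pre.length : Int) + 1, p, ans)).2.2.2
          = (tl.foldl stepA (1 + countG ys hd.2, ((pre ++ [hd]).length : Int) + 1, hd.2,
               ans ++ [(1 + countG ys hd.2, hd.2, hd.1)])).2.2.2 := by
      simp only [List.foldl_cons, stepA, hcount, List.length_append, List.length_cons,
        List.length_nil]
      push_cast
      ring_nf
    rw [hstep, ih (pre ++ [hd]) _ _ hd.2 (by simp [hsplit]) htl_le]
    · simp
    · right
      constructor
      · rfl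
      · intro x hx
        rw [List.mem_append] at hx
        rcases hx with h | h
        · rcases hinv with ⟨hpre, hlt⟩ | ⟨_, hpre_ge⟩
          · rw [hpre] at h; simp at h
          · have := hpre_ge x h; omega
        · simp at h; rw [h]

-- ===== VERDICT (by name: the statement is the Claim_ definition above) =====
theorem to_leaderboard_spec : Claim_equal_to_leaderboard := by
  intro scores hdom
  unfold Spec_to_leaderboard to_leaderboard to_leaderboard_alt
  set ys := PySem.List.sorted scores (fun x => x.2) true with hys
  have hpw : ys.Pairwise (fun a b => b.2 ≤ a.2) := PySem.List.sorted_pairwise_rev ..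
  have hbound : ∀ x ∈ ys, x.2 < 10 ^ 100 := by
    intro x hx
    have hx' : x ∈ scores := (PySem.List.mem_sorted ..).mp hx
    have := List.all_eq_true.mp hdom x hx'
    simp only [pvDomInt, Bool.and_eq_true, decide_eq_true_eq] at this
    omega
  have := loopA_eq ys hpw ys [] [] 1 (10 ^ 100) (by simp)
    (fun x hx => le_of_lt (hbound x hx)) (Or.inl ⟨rfl, hbound⟩)
  simp only [List.length_nil, Nat.cast_zero, zero_add, List.nil_append] at this
  simp only [countG] at this
  exact this
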